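-- pv_equiv track=rewrite | github.com/khel-kim/CodingPractice | Programmers/heap/42627.py | solution
-- ===== SOURCE A (Python) =====
-- def solution(jobs):
--     import heapq
--     sorted_jobs = sorted(jobs, key=lambda x: (x[0], x[1]))
--     total = 0
--     heap = []
--     time = sorted_jobs[0][0]
--     for request, taken_time in sorted_jobs:
--         if request <= time:
--             heapq.heappush(heap, (taken_time, request))
--         else:
--             while heap and time < request:
--                 cur_taken_time, cur_request = heapq.heappop(heap)
--                 if time < cur_request:
--                     time = cur_request
--                 time += cur_taken_time
--                 total += time - cur_request
--
--             heapq.heappush(heap, (taken_time, request))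
--
--     while heap:
--         cur_taken_time, cur_request = heapq.heappop(heap)
--         if time < cur_request:
--             time = cur_request
--         time += cur_taken_time
--         total += time - cur_request
--     return total // len(jobs)
-- ===== SOURCE B (Python) =====
-- def solution(jobs):
--     order = sorted(jobs, key=lambda x: (x[0], x[1]))
--     time = order[0][0]
--     total = 0
--     active = []
--     i = 0
--     while i < len(order) or active:
--         if i < len(order) and (not active or order[i][0] <= time):
--             request, taken = order[i]
--             active.append((taken, request))
--             i += 1
--         else:
--             taken, request = min(active)
--             active.remove((taken, request))
--             if time < request:
--                 time = request
--             time += taken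
--             total += time - request
--     return total // len(jobs)
-- ===== Notes on version B (the rewrite author's own statement) =====
-- stated objective: simpler
-- what changed: A's three loops (for over sorted jobs + inner drain-while + trailing drain-while) and its heapq heap are replaced by one event loop over the sorted list with an index pointer and a plain list scanned with min(), with a single copy of the run-a-job code.
import Mathlib
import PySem

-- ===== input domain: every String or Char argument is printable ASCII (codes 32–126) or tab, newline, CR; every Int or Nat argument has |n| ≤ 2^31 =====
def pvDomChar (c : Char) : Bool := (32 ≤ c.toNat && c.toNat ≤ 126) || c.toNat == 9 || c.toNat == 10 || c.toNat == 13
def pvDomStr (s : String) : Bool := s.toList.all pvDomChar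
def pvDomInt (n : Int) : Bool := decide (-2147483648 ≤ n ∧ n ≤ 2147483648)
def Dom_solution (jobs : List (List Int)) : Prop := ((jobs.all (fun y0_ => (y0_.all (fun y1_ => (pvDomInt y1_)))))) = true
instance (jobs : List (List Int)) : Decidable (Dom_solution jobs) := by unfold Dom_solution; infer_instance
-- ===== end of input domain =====

-- B fuses A's three loops (for + inner drain-while + trailing drain-while) into one event loop and
-- replaces the heap by a plain list scanned with min — simpler (no heapq, one copy of the run-a-job code).

-- membership fact cited by the ports' termination proofs
theorem pvFoldlOptMem {α : Type} (f : Option α → α → Option α)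
    (hf : ∀ acc x, f acc x = acc ∨ f acc x = some x) :
    ∀ (xs : List α) (acc : Option α) (m : α), xs.foldl f acc = some m → acc = some m ∨ m ∈ xs := by
  intro xs
  induction xs with
  | nil => intro acc m h; exact Or.inl h
  | cons x t ih =>
    intro acc m h
    simp only [List.foldl_cons] at h
    rcases ih (f acc x) m h with h' | h'
    · rcases hf acc x with he | he
      · exact Or.inl (he ▸ h')
      · rw [he] at h'
        injection h' with hx
        subst hx
        exact Or.inr (List.mem_cons_self ..)
    · exact Or.inr (List.mem_cons_of_mem _ h')

theorem pvMin2Mem (xs : List (Int × Int)) (m : Int × Int)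
    (h : PySem.List.min2? xs Prod.fst Prod.snd = some m) : m ∈ xs := by
  unfold PySem.List.min2? at h
  refine (pvFoldlOptMem _ ?_ xs none m h).resolve_left (by simp)
  intro acc x
  cases acc with
  | none => exact Or.inr rfl
  | some mm =>
    dsimp only
    split
    · exact Or.inr rfl
    · exact Or.inl rfl

-- ===== PORT A =====
-- heapq is modeled as a multiset: heappush appends, heappop removes the minimal (taken, request)
-- pair — exact here, since only the popped minimum and heap emptiness are ever observed.
def heapPopA (heap : List (Int × Int)) : Option ((Int × Int) × List (Int × Int)) :=
  match PySem.List.min2? heap Prod.fst Prod.snd with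
  | none => none
  | some m => some (m, heap.erase m)

theorem heapPopA_erase (heap : List (Int × Int)) (m : Int × Int) (rest : List (Int × Int))
    (h : heapPopA heap = some (m, rest)) : rest = heap.erase m ∧ m ∈ heap := by
  unfold heapPopA at h
  cases hm : PySem.List.min2? heap Prod.fst Prod.snd with
  | none => rw [hm] at h; exact absurd h (by simp)
  | some m' =>
    rw [hm] at h
    obtain ⟨h1, h2⟩ := Prod.mk.injEq .. ▸ Option.some.injEq .. ▸ h
    subst h1
    exact ⟨h2.symm ▸ rfl, pvMin2Mem _ _ hm⟩

-- inner 'while heap and time < request' drain of A's for-loop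
def drainA (request : Int) (heap : List (Int × Int)) (time total : Int) :
    List (Int × Int) × Int × Int :=
  match h : heapPopA heap with
  | none => (heap, time, total)
  | some (m, rest) =>
    if time < request then
      let time1 := if time < m.2 then m.2 else time
      let time2 := time1 + m.1
      drainA request rest time2 (total + (time2 - m.2))
    else (heap, time, total)
termination_by heap.length
decreasing_by
  obtain ⟨he, hm⟩ := heapPopA_erase _ _ _ h
  subst he; have h1 := List.length_erase_of_mem hm
  have h2 := List.length_pos_of_mem hm
  omega

-- trailing 'while heap' drain
def finalA (heap : List (Int × Int)) (time total : Int) : List (Int × Int) × Int × Int :=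
  match h : heapPopA heap with
  | none => (heap, time, total)
  | some (m, rest) =>
    let time1 := if time < m.2 then m.2 else time
    let time2 := time1 + m.1
    finalA rest time2 (total + (time2 - m.2))
termination_by heap.length
decreasing_by
  obtain ⟨he, hm⟩ := heapPopA_erase _ _ _ h
  subst he; have h1 := List.length_erase_of_mem hm
  have h2 := List.length_pos_of_mem hm
  omega

-- body of A's for-loop; state = (total, heap, time)
def stepA (s : Int × List (Int × Int) × Int) (j : List Int) : Int × List (Int × Int) × Int :=
  let request := j.getD 0 0     -- j[0], j[1]: exact under Pre_ (every job has length 2)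
  let taken_time := j.getD 1 0
  let (total, heap, time) := s
  if request ≤ time then (total, heap ++ [(taken_time, request)], time)
  else
    let (heap', time', total') := drainA request heap time total
    (total', heap' ++ [(taken_time, request)], time')

def solution (jobs : List (List Int)) : Int :=
  let sorted_jobs := PySem.List.sorted2 jobs (fun x => x.getD 0 0) (fun x => x.getD 1 0)
  let time0 := (sorted_jobs.headD []).getD 0 0   -- sorted_jobs[0][0]: in range under Pre_
  let s := sorted_jobs.foldl stepA (0, [], time0)
  let f := finalA s.2.1 s.2.2 s.1
  PySem.Int.floordiv f.2.2 jobs.length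

-- ===== PORT B =====
-- single event loop: either admit the next arrival or run the minimal active job
def runB (rest : List (List Int)) (active : List (Int × Int)) (time total : Int) : Int :=
  if rest = [] ∧ active = [] then total
  else if h : rest ≠ [] ∧ (active = [] ∨ (rest.headD []).getD 0 0 ≤ time) then
    runB rest.tail (active ++ [((rest.headD []).getD 1 0, (rest.headD []).getD 0 0)]) time total
  else
    match hm : PySem.List.min2? active Prod.fst Prod.snd with
    | none => total            -- unreachable: active ≠ [] in this branch
    | some m =>
      match hr : PySem.List.remove? active m with
      | none => total          -- unreachable: m ∈ active
      | some active' =>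
        let time1 := if time < m.2 then m.2 else time
        let time2 := time1 + m.1
        runB rest active' time2 (total + (time2 - m.2))
termination_by 2 * rest.length + active.length
decreasing_by
  · obtain ⟨hne, -⟩ := h
    cases rest with
    | nil => exact absurd rfl hne
    | cons x t => simp [List.length_append]; omega
  · have hmem : m ∈ active := pvMin2Mem _ _ hm
    have hae : active' = active.erase m := by
      rw [PySem.List.remove?_eq_some_erase active m hmem] at hr
      exact (Option.some.injEq .. ▸ hr).symm
    subst hae
    have h1 := List.length_erase_of_mem hmem
    have h2 := List.length_pos_of_mem hmem
    omega

def solution_alt (jobs : List (List Int)) : Int :=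
  let order := PySem.List.sorted2 jobs (fun x => x.getD 0 0) (fun x => x.getD 1 0)
  let time0 := (order.headD []).getD 0 0   -- order[0][0]: in range under Pre_
  PySem.Int.floordiv (runB order [] time0 0) jobs.length

-- ===== PRECONDITION & SPEC =====
-- Pre_ excludes exactly the inputs where Python A raises: the empty list (IndexError on
-- sorted_jobs[0]) and jobs whose inner list has length ≠ 2 (IndexError in the sort key /
-- ValueError unpacking 'request, taken_time').
def Pre_solution (jobs : List (List Int)) : Prop :=
  jobs ≠ [] ∧ ∀ j ∈ jobs, j.length = 2
instance (jobs : List (List Int)) : Decidable (Pre_solution jobs) := by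
  unfold Pre_solution; infer_instance
def pvWitness_solution : List (List Int) := [[0, 3], [1, 9], [2, 6]]

def Spec_solution (jobs : List (List Int)) (out : Int) : Prop := out = solution_alt jobs
instance (jobs : List (List Int)) (out : Int) : Decidable (Spec_solution jobs out) := by unfold Spec_solution; infer_instance

-- ===== CLAIM (what is proved, stated in full; the proofs are below) =====
def Claim_equal_solution : Prop := ∀ (jobs : List (List Int)), Dom_solution jobs → Pre_solution jobs → Spec_solution jobs (solution jobs)

-- ===== LEMMAS AND PROOFS =====

theorem pvFoldlSome {α : Type} (f : Option α → α → Option α)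
    (hf : ∀ (a : α) (x : α), ∃ b, f (some a) x = some b) :
    ∀ (t : List α) (a : α), ∃ m, t.foldl f (some a) = some m := by
  intro t
  induction t with
  | nil => exact fun a => ⟨a, rfl⟩
  | cons y t ih =>
    intro a
    simp only [List.foldl_cons]
    obtain ⟨b, hb⟩ := hf a y
    rw [hb]
    exact ih b

theorem min2_some_of_ne_nil (xs : List (Int × Int)) (h : xs ≠ []) :
    ∃ m, PySem.List.min2? xs Prod.fst Prod.snd = some m := by
  unfold PySem.List.min2?
  cases xs with
  | nil => exact absurd rfl h
  | cons x t =>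
    simp only [List.foldl_cons]
    refine pvFoldlSome _ ?_ t x
    intro a y
    dsimp only
    split
    · exact ⟨y, rfl⟩
    · exact ⟨a, rfl⟩

theorem heapPopA_of_ne_nil (heap : List (Int × Int)) (h : heap ≠ []) :
    ∃ m, m ∈ heap ∧ heapPopA heap = some (m, heap.erase m) ∧
      PySem.List.min2? heap Prod.fst Prod.snd = some m := by
  obtain ⟨m, hm⟩ := min2_some_of_ne_nil heap h
  exact ⟨m, pvMin2Mem _ _ hm, by unfold heapPopA; rw [hm], hm⟩

theorem finalA_nil (time total : Int) : finalA [] time total = ([], time, total) := by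
  rw [finalA]
  simp [heapPopA, PySem.List.min2?]

theorem drainA_nil (request time total : Int) :
    drainA request [] time total = ([], time, total) := by
  rw [drainA]
  simp [heapPopA, PySem.List.min2?]

theorem runB_nil_nil (time total : Int) : runB [] [] time total = total := by
  rw [runB]
  simp

-- B admits the next arrival
theorem runB_push (j : List Int) (rs : List (List Int)) (active : List (Int × Int))
    (time total : Int) (h : active = [] ∨ j.getD 0 0 ≤ time) :
    runB (j :: rs) active time total =
      runB rs (active ++ [(j.getD 1 0, j.getD 0 0)]) time total := by
  rw [runB]
  rw [if_neg (show ¬(j :: rs = [] ∧ active = []) by simp)]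
  rw [dif_pos (show j :: rs ≠ [] ∧ (active = [] ∨ ((j :: rs).headD []).getD 0 0 ≤ time) by
    exact ⟨by simp, by simpa using h⟩)]
  simp only [List.headD_cons, List.tail_cons]

-- B runs the minimal active job
theorem runB_pop (rest : List (List Int)) (active : List (Int × Int)) (m : Int × Int)
    (time total : Int)
    (hc1 : ¬(rest = [] ∧ active = []))
    (hc2 : ¬(rest ≠ [] ∧ (active = [] ∨ (rest.headD []).getD 0 0 ≤ time)))
    (hmin : PySem.List.min2? active Prod.fst Prod.snd = some m) (hmem : m ∈ active) :
    runB rest active time total =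
      runB rest (active.erase m) ((if time < m.2 then m.2 else time) + m.1)
        (total + (((if time < m.2 then m.2 else time) + m.1) - m.2)) := by
  rw [runB]
  rw [if_neg hc1, dif_neg hc2]
  split
  · rename_i heq
    rw [hmin] at heq
    cases heq
  · rename_i m1 heq
    rw [hmin] at heq
    injection heq with heq
    subst heq
    split
    · rename_i heq2
      rw [PySem.List.remove?_eq_some_erase active m hmem] at heq2
      cases heq2
    · rename_i active' heq2
      rw [PySem.List.remove?_eq_some_erase active m hmem] at heq2
      injection heq2 with heq2
      subst heq2
      rfl

-- one pop step of the trailing drain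
theorem finalA_pop (heap : List (Int × Int)) (m : Int × Int) (time total : Int)
    (h : heapPopA heap = some (m, heap.erase m)) :
    finalA heap time total =
      finalA (heap.erase m) ((if time < m.2 then m.2 else time) + m.1)
        (total + (((if time < m.2 then m.2 else time) + m.1) - m.2)) := by
  rw [finalA]
  split
  · simp_all
  · rename_i m' rest' heq
    rw [h] at heq
    injection heq with heq
    obtain ⟨h1, h2⟩ := Prod.mk.injEq .. ▸ heq
    subst h1
    rw [h2]

-- one pop step of the inner drain, while time < request
theorem drainA_pop (request : Int) (heap : List (Int × Int)) (m : Int × Int) (time total : Int)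
    (h : heapPopA heap = some (m, heap.erase m)) (ht : time < request) :
    drainA request heap time total =
      drainA request (heap.erase m) ((if time < m.2 then m.2 else time) + m.1)
        (total + (((if time < m.2 then m.2 else time) + m.1) - m.2)) := by
  rw [drainA]
  split
  · simp_all
  · rename_i m' rest' heq
    rw [h] at heq
    injection heq with heq
    obtain ⟨h1, h2⟩ := Prod.mk.injEq .. ▸ heq
    subst h1
    rw [if_pos ht, h2]

-- the drain stops as soon as the request has arrived
theorem drainA_stop (request : Int) (heap : List (Int × Int)) (time total : Int)
    (ht : request ≤ time) : drainA request heap time total = (heap, time, total) := by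
  rw [drainA]
  split
  · rfl
  · rw [if_neg (by omega)]

-- A's loop body absorbs one pop of the inner drain
theorem stepA_pop (j : List Int) (heap : List (Int × Int)) (m : Int × Int) (time total : Int)
    (h : heapPopA heap = some (m, heap.erase m)) (ht : time < j.getD 0 0) :
    stepA (total, heap, time) j =
      stepA (total + (((if time < m.2 then m.2 else time) + m.1) - m.2),
             heap.erase m, (if time < m.2 then m.2 else time) + m.1) j := by
  unfold stepA
  dsimp only
  rw [if_neg (by omega)]
  by_cases h2 : j.getD 0 0 ≤ (if time < m.2 then m.2 else time) + m.1
  · rw [if_pos h2, drainA_pop _ _ _ _ _ h ht, drainA_stop _ _ _ _ h2]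
  · rw [if_neg h2, drainA_pop _ _ _ _ _ h ht]

-- the loop-fusion lemma: A's fold over the sorted list followed by the trailing drain computes
-- exactly B's single event loop, from ANY intermediate state
theorem fuseMain : ∀ (n : Nat) (rest : List (List Int)) (heap : List (Int × Int)) (time total : Int),
    2 * rest.length + heap.length ≤ n →
    (finalA (rest.foldl stepA (total, heap, time)).2.1
            (rest.foldl stepA (total, heap, time)).2.2
            (rest.foldl stepA (total, heap, time)).1).2.2
      = runB rest heap time total := by
  intro n
  induction n with
  | zero =>
    intro rest heap time total hle
    have h1 : rest = [] := List.length_eq_zero_iff.mp (by omega)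
    have h2 : heap = [] := List.length_eq_zero_iff.mp (by omega)
    subst h1; subst h2
    simp only [List.foldl_nil, finalA_nil, runB_nil_nil]
  | succ n ih =>
    intro rest heap time total hle
    cases rest with
    | nil =>
      simp only [List.foldl_nil]
      by_cases hh : heap = []
      · subst hh
        simp only [finalA_nil, runB_nil_nil]
      · obtain ⟨m, hmem, hpop, hmin⟩ := heapPopA_of_ne_nil heap hh
        rw [finalA_pop _ _ _ _ hpop]
        rw [runB_pop [] heap m time total (by simp [hh]) (by simp) hmin hmem]
        have hlen := List.length_erase_of_mem hmem
        have hpos := List.length_pos_of_mem hmem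
        have := ih [] (heap.erase m) ((if time < m.2 then m.2 else time) + m.1)
          (total + (((if time < m.2 then m.2 else time) + m.1) - m.2)) (by simp at hle ⊢; omega)
        simp only [List.foldl_nil] at this
        exact this
    | cons j rs =>
      by_cases hpush : heap = [] ∨ j.getD 0 0 ≤ time
      · have hstep : stepA (total, heap, time) j =
            (total, heap ++ [(j.getD 1 0, j.getD 0 0)], time) := by
          unfold stepA
          dsimp only
          rcases hpush with hh | hr
          · subst hh
            by_cases hr : j.getD 0 0 ≤ time
            · rw [if_pos hr]
            · rw [if_neg hr, drainA_nil]
          · rw [if_pos hr]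
        rw [runB_push j rs heap time total hpush]
        simp only [List.foldl_cons, hstep]
        exact ih rs (heap ++ [(j.getD 1 0, j.getD 0 0)]) time total
          (by simp at hle ⊢; omega)
      · obtain ⟨hh, hr⟩ := not_or.mp hpush
        rw [not_le] at hr
        obtain ⟨m, hmem, hpop, hmin⟩ := heapPopA_of_ne_nil heap hh
        have hA : List.foldl stepA (total, heap, time) (j :: rs) =
            List.foldl stepA (total + (((if time < m.2 then m.2 else time) + m.1) - m.2),
              heap.erase m, (if time < m.2 then m.2 else time) + m.1) (j :: rs) := by
          simp only [List.foldl_cons]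
          rw [stepA_pop j heap m time total hpop (by omega)]
        rw [hA]
        rw [runB_pop (j :: rs) heap m time total (by simp)
          (by simp only [ne_eq, List.headD_cons]; intro hcc; rcases hcc.2 with h | h; exact hh h; omega)
          hmin hmem]
        have hlen := List.length_erase_of_mem hmem
        have hpos := List.length_pos_of_mem hmem
        exact ih (j :: rs) (heap.erase m) ((if time < m.2 then m.2 else time) + m.1)
          (total + (((if time < m.2 then m.2 else time) + m.1) - m.2))
          (by simp at hle ⊢; omega)

-- ===== VERDICT (by name: the statement is the Claim_ definition above) =====
theorem solution_spec : Claim_equal_solution := by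
  intro jobs _ _
  unfold Spec_solution solution solution_alt
  exact congrArg (fun z => PySem.Int.floordiv z (jobs.length : Int))
    (fuseMain (2 * (PySem.List.sorted2 jobs (fun x => x.getD 0 0) (fun x => x.getD 1 0)).length + 0)
      (PySem.List.sorted2 jobs (fun x => x.getD 0 0) (fun x => x.getD 1 0)) []
      (((PySem.List.sorted2 jobs (fun x => x.getD 0 0) (fun x => x.getD 1 0)).headD []).getD 0 0) 0
      (by simp))
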